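-- pv_equiv track=rewrite | github.com/habdvgbej914/contrarian-analysis | paipan_core.py | rotate_stars
-- ===== SOURCE A (Python) =====
-- STARS = ['天蓬','天芮','天冲','天辅','天禽','天心','天柱','天任','天英']
--
-- RING = [1, 8, 3, 4, 9, 2, 7, 6]
--
-- def rotate_stars(zhi_fu_palace, shi_gan_palace):
--     """计算九星旋转后的位置
--     zhi_fu_palace: 值符星原位宫号
--     shi_gan_palace: 时干所在地盘宫号
--     返回: {宫号: 星名}
--     """
--     # 处理中5宫寄坤2
--     from_ring = 2 if zhi_fu_palace == 5 else zhi_fu_palace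
--     to_ring = 2 if shi_gan_palace == 5 else shi_gan_palace
--
--     # 计算外环旋转步数
--     from_idx = RING.index(from_ring)
--     to_idx = RING.index(to_ring)
--     steps = (to_idx - from_idx) % 8
--
--     result = {}
--     for star_idx, star_name in enumerate(STARS):
--         home_palace = star_idx + 1  # 本位宫号
--         if star_name == '天禽':
--             continue  # 天禽寄坤2，跟天芮走
--
--         home_ring = 2 if home_palace == 5 else home_palace
--         ring_idx = RING.index(home_ring)
--         new_ring_idx = (ring_idx + steps) % 8
--         new_palace = RING[new_ring_idx]
--         result[new_palace] = star_name
--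
--     return result
-- ===== SOURCE B (Python) =====
-- STARS = ['天蓬','天芮','天冲','天辅','天禽','天心','天柱','天任','天英']
--
-- RING = [1, 8, 3, 4, 9, 2, 7, 6]
--
-- def rotate_stars(zhi_fu_palace, shi_gan_palace):
--     from_ring = 2 if zhi_fu_palace == 5 else zhi_fu_palace
--     to_ring = 2 if shi_gan_palace == 5 else shi_gan_palace
--     k = RING.index(from_ring)
--     t = RING.index(to_ring)
--     # place each star (skipping 天禽) at its home ring slot, keyed by slot index
--     slots = {RING.index(2 if i + 1 == 5 else i + 1): s
--              for i, s in enumerate(STARS) if s != '天禽'}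
--     # turn the whole wheel one slot at a time until the value-talisman slot reaches t
--     while k != t:
--         slots = {(p + 1) % 8: s for p, s in slots.items()}
--         k = (k + 1) % 8
--     return {RING[p]: s for p, s in slots.items()}
-- ===== Notes on version B (the rewrite author's own statement) =====
-- stated objective: alternative
-- what changed: B simulates the wheel: it places the stars on their home ring slots once, then turns the whole ring one slot at a time (a while loop, no step count or per-star modular jump) until the value-talisman slot reaches the target, and finally reads the slots back as palaces.
import Mathlib
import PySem

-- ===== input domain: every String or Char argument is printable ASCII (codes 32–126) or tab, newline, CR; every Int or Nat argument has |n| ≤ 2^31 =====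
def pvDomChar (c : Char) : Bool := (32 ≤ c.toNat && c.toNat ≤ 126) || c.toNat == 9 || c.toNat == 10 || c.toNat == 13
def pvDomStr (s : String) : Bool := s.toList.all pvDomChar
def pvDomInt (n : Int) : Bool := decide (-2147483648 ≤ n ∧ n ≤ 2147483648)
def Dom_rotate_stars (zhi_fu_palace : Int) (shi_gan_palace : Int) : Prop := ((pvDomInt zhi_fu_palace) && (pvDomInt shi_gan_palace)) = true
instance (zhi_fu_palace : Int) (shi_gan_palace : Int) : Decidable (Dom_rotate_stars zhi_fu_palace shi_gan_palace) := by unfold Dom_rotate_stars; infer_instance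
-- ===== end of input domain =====

-- B replaces A's closed-form step arithmetic and per-star modular jump with a wheel
-- simulation: place the stars on the ring once, then turn the whole wheel one slot at a
-- time until the value-talisman slot aligns (objective: alternative decomposition).

-- ===== PORT A =====
def starsA : List String := ["天蓬", "天芮", "天冲", "天辅", "天禽", "天心", "天柱", "天任", "天英"]
def ringA : List Int := [1, 8, 3, 4, 9, 2, 7, 6]

def rotate_stars (zhi_fu_palace : Int) (shi_gan_palace : Int) : List (Int × String) :=
  let from_ring : Int := if zhi_fu_palace = 5 then 2 else zhi_fu_palace
  let to_ring : Int := if shi_gan_palace = 5 then 2 else shi_gan_palace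
  -- RING.index raises ValueError when the value is absent: Pre_ excludes those inputs, the .getD 0 is never reached there
  let from_idx : Int := ((PySem.List.index? ringA from_ring).getD 0 : Nat)
  let to_idx : Int := ((PySem.List.index? ringA to_ring).getD 0 : Nat)
  let steps : Int := PySem.Int.mod (to_idx - from_idx) 8
  let result : PySem.Dict Int String :=
    (PySem.List.enumerate starsA).foldl (fun result p =>
      let home_palace : Int := p.1 + 1
      if p.2 = "天禽" then result
      else
        let home_ring : Int := if home_palace = 5 then 2 else home_palace
        let ring_idx : Int := ((PySem.List.index? ringA home_ring).getD 0 : Nat)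
        let new_ring_idx : Int := PySem.Int.mod (ring_idx + steps) 8
        let new_palace : Int := (PySem.List.pyGet? ringA new_ring_idx).getD 0
        result.insert new_palace p.2) PySem.Dict.empty
  result.items

-- ===== PORT B =====
def starsB : List String := ["天蓬", "天芮", "天冲", "天辅", "天禽", "天心", "天柱", "天任", "天英"]
def ringB : List Int := [1, 8, 3, 4, 9, 2, 7, 6]

-- one turn of the wheel: every occupied slot advances by one (mod 8)
def turnB (slots : PySem.Dict Int String) : PySem.Dict Int String :=
  slots.items.foldl (fun d q => d.insert (PySem.Int.mod (q.1 + 1) 8) q.2) PySem.Dict.empty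

-- Python's `while k != t:` loop; it runs at most 7 times since k, t ∈ [0,8) cycle mod 8,
-- so fuel 8 makes the same iteration count total (fuel is never exhausted inside Pre_).
def spinB (fuel : Nat) (slots : PySem.Dict Int String) (k t : Int) : PySem.Dict Int String :=
  match fuel with
  | 0 => slots
  | fuel + 1 =>
      if k = t then slots
      else spinB fuel (turnB slots) (PySem.Int.mod (k + 1) 8) t

def rotate_stars_alt (zhi_fu_palace : Int) (shi_gan_palace : Int) : List (Int × String) :=
  let from_ring : Int := if zhi_fu_palace = 5 then 2 else zhi_fu_palace
  let to_ring : Int := if shi_gan_palace = 5 then 2 else shi_gan_palace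
  -- RING.index raises ValueError when the value is absent: Pre_ excludes those inputs, the .getD 0 is never reached there
  let k : Int := ((PySem.List.index? ringB from_ring).getD 0 : Nat)
  let t : Int := ((PySem.List.index? ringB to_ring).getD 0 : Nat)
  let slots : PySem.Dict Int String :=
    (PySem.List.enumerate starsB).foldl (fun d p =>
      if p.2 = "天禽" then d
      else d.insert (((PySem.List.index? ringB (if p.1 + 1 = 5 then 2 else p.1 + 1)).getD 0 : Nat) : Int) p.2)
      PySem.Dict.empty
  let final := spinB 8 slots k t
  (final.items.foldl (fun d q => d.insert ((PySem.List.pyGet? ringB q.1).getD 0) q.2)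
    (PySem.Dict.empty : PySem.Dict Int String)).items

-- ===== PRECONDITION & SPEC =====
-- Pre_ excludes exactly the inputs outside palaces 1..9, where A raises ValueError (RING.index).
def Pre_rotate_stars (zhi_fu_palace : Int) (shi_gan_palace : Int) : Prop :=
  (1 ≤ zhi_fu_palace ∧ zhi_fu_palace ≤ 9) ∧ (1 ≤ shi_gan_palace ∧ shi_gan_palace ≤ 9)
instance (zhi_fu_palace : Int) (shi_gan_palace : Int) : Decidable (Pre_rotate_stars zhi_fu_palace shi_gan_palace) := by unfold Pre_rotate_stars; infer_instance
def pvWitness_rotate_stars : Int × Int := (5, 3)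

def Spec_rotate_stars (zhi_fu_palace : Int) (shi_gan_palace : Int) (out : List (Int × String)) : Prop := out = rotate_stars_alt zhi_fu_palace shi_gan_palace
instance (zhi_fu_palace : Int) (shi_gan_palace : Int) (out : List (Int × String)) : Decidable (Spec_rotate_stars zhi_fu_palace shi_gan_palace out) := by unfold Spec_rotate_stars; infer_instance

-- ===== CLAIM (what is proved, stated in full; the proofs are below) =====
def Claim_equal_rotate_stars : Prop := ∀ (zhi_fu_palace : Int) (shi_gan_palace : Int), Dom_rotate_stars zhi_fu_palace shi_gan_palace → Pre_rotate_stars zhi_fu_palace shi_gan_palace → Spec_rotate_stars zhi_fu_palace shi_gan_palace (rotate_stars zhi_fu_palace shi_gan_palace)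

-- ===== LEMMAS AND PROOFS =====
theorem pre_cases (n : Int) (h1 : 1 ≤ n) (h2 : n ≤ 9) :
    n = 1 ∨ n = 2 ∨ n = 3 ∨ n = 4 ∨ n = 5 ∨ n = 6 ∨ n = 7 ∨ n = 8 ∨ n = 9 := by omega

-- ===== VERDICT (by name: the statement is the Claim_ definition above) =====
theorem rotate_stars_spec : Claim_equal_rotate_stars := by
  intro zf sg _ hpre
  obtain ⟨⟨h1, h2⟩, ⟨h3, h4⟩⟩ := hpre
  unfold Spec_rotate_stars
  rcases pre_cases zf h1 h2 with h | h | h | h | h | h | h | h | h <;> subst h <;>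
    rcases pre_cases sg h3 h4 with h | h | h | h | h | h | h | h | h <;> subst h <;> decide
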